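-- pv_equiv track=rewrite | github.com/antimatrix777/tiktok-direito-auto | scripts/4_video_assembly.py | segmentar_texto
-- ===== SOURCE A (Python) =====
-- WORDS_PER_CAPTION = 2
--
-- def segmentar_texto(texto: str, palavras_por_bloco: int = WORDS_PER_CAPTION) -> list[str]:
--     """
--     Divide o texto em blocos de N palavras para as legendas.
--     Respeita pontuação: quebra antes de vírgula e ponto.
--     """
--     palavras = texto.split()
--     blocos = []
--     atual = []
--
--     for palavra in palavras:
--         atual.append(palavra)
--         # Quebra no limite de palavras OU após pontuação forte
--         if len(atual) >= palavras_por_bloco or palavra.endswith((".", "!", "?", ",")):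
--             blocos.append(" ".join(atual))
--             atual = []
--
--     if atual:
--         blocos.append(" ".join(atual))
--
--     return blocos
-- ===== SOURCE B (Python) =====
-- WORDS_PER_CAPTION = 2
--
-- def segmentar_texto(texto: str, palavras_por_bloco: int = WORDS_PER_CAPTION) -> list[str]:
--     # Phase 1: find block boundaries (as segment lengths); Phase 2: slice and join.
--     palavras = texto.split()
--     tamanhos = []
--     conta = 0
--     for palavra in palavras:
--         conta += 1
--         if conta >= palavras_por_bloco or palavra.endswith((".", "!", "?", ",")):
--             tamanhos.append(conta)
--             conta = 0
--     if conta: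
--         tamanhos.append(conta)
--     blocos = []
--     resto = palavras
--     for t in tamanhos:
--         blocos.append(" ".join(resto[:t]))
--         resto = resto[t:]
--     return blocos
-- ===== Notes on version B (the rewrite author's own statement) =====
-- stated objective: alternative
-- what changed: Replaces A's single pass with a growing block accumulator by a two-phase decomposition: a first pass that only records block boundaries (segment lengths, resetting the counter at each break), then a second pass that slices the word list at those boundaries and joins each slice.
import Mathlib
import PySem

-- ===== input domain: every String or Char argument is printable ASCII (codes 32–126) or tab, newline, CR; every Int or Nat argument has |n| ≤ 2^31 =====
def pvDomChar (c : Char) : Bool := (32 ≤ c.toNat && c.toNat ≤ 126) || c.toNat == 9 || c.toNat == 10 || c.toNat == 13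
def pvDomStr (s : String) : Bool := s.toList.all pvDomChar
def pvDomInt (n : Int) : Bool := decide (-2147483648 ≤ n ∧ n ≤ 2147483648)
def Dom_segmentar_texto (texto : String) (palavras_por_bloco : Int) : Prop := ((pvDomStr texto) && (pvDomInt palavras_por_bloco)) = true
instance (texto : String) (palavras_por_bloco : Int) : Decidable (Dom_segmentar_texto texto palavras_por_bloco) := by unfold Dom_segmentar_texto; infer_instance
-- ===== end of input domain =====

-- B replaces A's single accumulator pass by two phases — first find block boundaries
-- (segment lengths), then slice-and-join — same return value (objective: alternative decomposition).

-- ===== PORT A =====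
-- palavra.endswith((".", "!", "?", ",")) — shared by both ports (both Pythons test the same tuple)
def pvPunct (w : String) : Bool :=
  PySem.Str.endswith w "." || PySem.Str.endswith w "!" || PySem.Str.endswith w "?" || PySem.Str.endswith w ","

def segmentar_texto (texto : String) (palavras_por_bloco : Int) : List String :=
  let palavras := PySem.Str.split₀ texto
  let st := palavras.foldl (fun (st : List String × List String) palavra =>
    let atual := st.2 ++ [palavra]
    if decide (((atual.length : Int)) ≥ palavras_por_bloco) || pvPunct palavra then
      (st.1 ++ [PySem.Str.join " " atual], [])
    else (st.1, atual)) ([], [])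
  if st.2 ≠ [] then st.1 ++ [PySem.Str.join " " st.2] else st.1

-- ===== PORT B =====
def segmentar_texto_alt (texto : String) (palavras_por_bloco : Int) : List String :=
  let palavras := PySem.Str.split₀ texto
  -- phase 1: boundary lengths
  let p1 := palavras.foldl (fun (st : List Int × Int) palavra =>
    let conta := st.2 + 1
    if decide (conta ≥ palavras_por_bloco) || pvPunct palavra then (st.1 ++ [conta], 0)
    else (st.1, conta)) ([], 0)
  let tamanhos := if p1.2 ≠ 0 then p1.1 ++ [p1.2] else p1.1
  -- phase 2: slice and join
  let p2 := tamanhos.foldl (fun (st : List String × List String) t =>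
    (st.1 ++ [PySem.Str.join " " (PySem.List.slice st.2 none (some t))],
     PySem.List.slice st.2 (some t) none)) ([], palavras)
  p2.1

-- ===== PRECONDITION & SPEC =====
def Spec_segmentar_texto (texto : String) (palavras_por_bloco : Int) (out : List String) : Prop := out = segmentar_texto_alt texto palavras_por_bloco
instance (texto : String) (palavras_por_bloco : Int) (out : List String) : Decidable (Spec_segmentar_texto texto palavras_por_bloco out) := by unfold Spec_segmentar_texto; infer_instance

-- ===== CLAIM (what is proved, stated in full; the proofs are below) =====
def Claim_equal_segmentar_texto : Prop := ∀ (texto : String) (palavras_por_bloco : Int), Dom_segmentar_texto texto palavras_por_bloco → Spec_segmentar_texto texto palavras_por_bloco (segmentar_texto texto palavras_por_bloco)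

-- ===== LEMMAS AND PROOFS =====

-- recursive rendering of A's loop (with the final leftover flush)
def pvALoop (pbb : Int) : List String → List String → List String → List String
  | [], blocos, atual => if atual ≠ [] then blocos ++ [PySem.Str.join " " atual] else blocos
  | w :: ws, blocos, atual =>
    if decide ((((atual ++ [w]).length : Int)) ≥ pbb) || pvPunct w then
      pvALoop pbb ws (blocos ++ [PySem.Str.join " " (atual ++ [w])]) []
    else pvALoop pbb ws blocos (atual ++ [w])

-- recursive rendering of B's phase 1 (with the final leftover length)
def pvTamRec (pbb : Int) : List String → Int → List Int
  | [], conta => if conta ≠ 0 then [conta] else []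
  | w :: ws, conta =>
    if decide (conta + 1 ≥ pbb) || pvPunct w then (conta + 1) :: pvTamRec pbb ws 0
    else pvTamRec pbb ws (conta + 1)

-- recursive rendering of B's phase 2
def pvP2Rec : List Int → List String → List String → List String
  | [], blocos, _ => blocos
  | t :: ts, blocos, resto =>
    pvP2Rec ts (blocos ++ [PySem.Str.join " " (PySem.List.slice resto none (some t))])
      (PySem.List.slice resto (some t) none)

lemma pvA_fold_eq (pbb : Int) (ws blocos atual : List String) :
    (if (ws.foldl (fun (st : List String × List String) palavra =>
        if decide ((((st.2 ++ [palavra]).length : Int)) ≥ pbb) || pvPunct palavra then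
          (st.1 ++ [PySem.Str.join " " (st.2 ++ [palavra])], [])
        else (st.1, st.2 ++ [palavra])) (blocos, atual)).2 ≠ [] then
      (ws.foldl (fun (st : List String × List String) palavra =>
        if decide ((((st.2 ++ [palavra]).length : Int)) ≥ pbb) || pvPunct palavra then
          (st.1 ++ [PySem.Str.join " " (st.2 ++ [palavra])], [])
        else (st.1, st.2 ++ [palavra])) (blocos, atual)).1
        ++ [PySem.Str.join " " ((ws.foldl (fun (st : List String × List String) palavra =>
        if decide ((((st.2 ++ [palavra]).length : Int)) ≥ pbb) || pvPunct palavra then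
          (st.1 ++ [PySem.Str.join " " (st.2 ++ [palavra])], [])
        else (st.1, st.2 ++ [palavra])) (blocos, atual)).2)]
    else (ws.foldl (fun (st : List String × List String) palavra =>
        if decide ((((st.2 ++ [palavra]).length : Int)) ≥ pbb) || pvPunct palavra then
          (st.1 ++ [PySem.Str.join " " (st.2 ++ [palavra])], [])
        else (st.1, st.2 ++ [palavra])) (blocos, atual)).1)
    = pvALoop pbb ws blocos atual := by
  induction ws generalizing blocos atual with
  | nil => simp [pvALoop]
  | cons w ws ih =>
    simp only [List.foldl_cons, pvALoop]
    by_cases h : (decide ((((atual ++ [w]).length : Int)) ≥ pbb) || pvPunct w) = true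
    · simp only [h, if_pos]; exact ih _ _
    · simp only [h, if_neg, Bool.false_eq_true, not_false_iff]; exact ih _ _

lemma pvB1_fold_eq (pbb : Int) (ws : List String) (ts : List Int) (conta : Int) :
    (if (ws.foldl (fun (st : List Int × Int) palavra =>
        if decide (st.2 + 1 ≥ pbb) || pvPunct palavra then (st.1 ++ [st.2 + 1], 0)
        else (st.1, st.2 + 1)) (ts, conta)).2 ≠ 0 then
      (ws.foldl (fun (st : List Int × Int) palavra =>
        if decide (st.2 + 1 ≥ pbb) || pvPunct palavra then (st.1 ++ [st.2 + 1], 0)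
        else (st.1, st.2 + 1)) (ts, conta)).1
        ++ [(ws.foldl (fun (st : List Int × Int) palavra =>
        if decide (st.2 + 1 ≥ pbb) || pvPunct palavra then (st.1 ++ [st.2 + 1], 0)
        else (st.1, st.2 + 1)) (ts, conta)).2]
    else (ws.foldl (fun (st : List Int × Int) palavra =>
        if decide (st.2 + 1 ≥ pbb) || pvPunct palavra then (st.1 ++ [st.2 + 1], 0)
        else (st.1, st.2 + 1)) (ts, conta)).1)
    = ts ++ pvTamRec pbb ws conta := by
  induction ws generalizing ts conta with
  | nil => simp only [List.foldl_nil, pvTamRec]; split_ifs <;> simp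
  | cons w ws ih =>
    simp only [List.foldl_cons, pvTamRec]
    by_cases h : (decide (conta + 1 ≥ pbb) || pvPunct w) = true
    · simp only [h, if_pos]
      rw [ih (ts ++ [conta + 1]) 0]; simp
    · simp only [h, if_neg, Bool.false_eq_true, not_false_iff]; exact ih _ _

lemma pvB2_fold_eq (ts : List Int) (blocos resto : List String) :
    (ts.foldl (fun (st : List String × List String) t =>
      (st.1 ++ [PySem.Str.join " " (PySem.List.slice st.2 none (some t))],
       PySem.List.slice st.2 (some t) none)) (blocos, resto)).1
    = pvP2Rec ts blocos resto := by
  induction ts generalizing blocos resto with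
  | nil => rfl
  | cons t ts ih => simp only [List.foldl_cons, pvP2Rec]; exact ih _ _

lemma pvMain (pbb : Int) (ws atual blocos : List String) :
    pvALoop pbb ws blocos atual
    = pvP2Rec (pvTamRec pbb ws ((atual.length : Int))) blocos (atual ++ ws) := by
  induction ws generalizing atual blocos with
  | nil =>
    simp only [pvALoop, pvTamRec, List.append_nil]
    by_cases h : atual = []
    · simp [h, pvP2Rec]
    · have hl : ((atual.length : Int)) ≠ 0 := by simp [h]
      rw [if_pos h, if_pos hl]
      simp [pvP2Rec, PySem.List.slice_to_natCast]
  | cons w ws ih =>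
    have hc : (atual.length : Int) + 1 = (((atual ++ [w]).length : Int)) := by
      push_cast [List.length_append, List.length_singleton]; omega
    have hsplit : atual ++ w :: ws = (atual ++ [w]) ++ ws := by simp
    simp only [pvALoop, pvTamRec, hc]
    by_cases h : (decide ((((atual ++ [w]).length : Int)) ≥ pbb) || pvPunct w) = true
    · rw [if_pos h, if_pos h]
      rw [ih [] (blocos ++ [PySem.Str.join " " (atual ++ [w])])]
      simp only [pvP2Rec]
      rw [PySem.List.slice_to_natCast, PySem.List.slice_from_natCast, hsplit,
        List.take_left, List.drop_left]
      simp
    · rw [if_neg h, if_neg h]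
      rw [ih (atual ++ [w]) blocos, hsplit]

-- ===== VERDICT (by name: the statement is the Claim_ definition above) =====
theorem segmentar_texto_spec : Claim_equal_segmentar_texto := by
  intro texto pbb _
  show segmentar_texto texto pbb = segmentar_texto_alt texto pbb
  have hA : segmentar_texto texto pbb = pvALoop pbb (PySem.Str.split₀ texto) [] [] :=
    pvA_fold_eq pbb (PySem.Str.split₀ texto) [] []
  have hB : segmentar_texto_alt texto pbb
      = pvP2Rec (pvTamRec pbb (PySem.Str.split₀ texto) 0) [] (PySem.Str.split₀ texto) := by
    have h1 := pvB1_fold_eq pbb (PySem.Str.split₀ texto) [] 0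
    have h2 := pvB2_fold_eq
      ((PySem.Str.split₀ texto).foldl (fun (st : List Int × Int) palavra =>
        if decide (st.2 + 1 ≥ pbb) || pvPunct palavra then (st.1 ++ [st.2 + 1], 0)
        else (st.1, st.2 + 1)) ([], 0) |> fun p => if p.2 ≠ 0 then p.1 ++ [p.2] else p.1)
      [] (PySem.Str.split₀ texto)
    calc segmentar_texto_alt texto pbb
        = pvP2Rec ((PySem.Str.split₀ texto).foldl (fun (st : List Int × Int) palavra =>
            if decide (st.2 + 1 ≥ pbb) || pvPunct palavra then (st.1 ++ [st.2 + 1], 0)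
            else (st.1, st.2 + 1)) ([], 0) |> fun p => if p.2 ≠ 0 then p.1 ++ [p.2] else p.1)
            [] (PySem.Str.split₀ texto) := h2
      _ = pvP2Rec ([] ++ pvTamRec pbb (PySem.Str.split₀ texto) 0) [] (PySem.Str.split₀ texto) := by
            rw [show ((PySem.Str.split₀ texto).foldl (fun (st : List Int × Int) palavra =>
              if decide (st.2 + 1 ≥ pbb) || pvPunct palavra then (st.1 ++ [st.2 + 1], 0)
              else (st.1, st.2 + 1)) ([], 0) |> fun p => if p.2 ≠ 0 then p.1 ++ [p.2] else p.1)
              = [] ++ pvTamRec pbb (PySem.Str.split₀ texto) 0 from h1]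
      _ = pvP2Rec (pvTamRec pbb (PySem.Str.split₀ texto) 0) [] (PySem.Str.split₀ texto) := by
            rw [List.nil_append]
  rw [hA, hB]
  simpa using pvMain pbb (PySem.Str.split₀ texto) [] []
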